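-- pv_equiv track=rewrite | github.com/aiyan1234/Daily-Programming | threeoddcons.py | three_oddcons
-- ===== SOURCE A (Python) =====
-- def three_oddcons(arr):
--     count=0
--     maxc=0
--     for i in arr:
--         if i%2!=0:
--             count+=1
--             maxc=max(maxc,count)
--         else:
--             count=0
--     return maxc>=3
-- ===== SOURCE B (Python) =====
-- def three_oddcons(arr):
--     return any(x % 2 and y % 2 and z % 2 for x, y, z in zip(arr, arr[1:], arr[2:]))
-- ===== Notes on version B (the rewrite author's own statement) =====
-- stated objective: idiomatic
-- what changed: Replaces the running-counter/max scan with a single any() over sliding windows of three elements built by zipping the list with its two shifted slices.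
import Mathlib
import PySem

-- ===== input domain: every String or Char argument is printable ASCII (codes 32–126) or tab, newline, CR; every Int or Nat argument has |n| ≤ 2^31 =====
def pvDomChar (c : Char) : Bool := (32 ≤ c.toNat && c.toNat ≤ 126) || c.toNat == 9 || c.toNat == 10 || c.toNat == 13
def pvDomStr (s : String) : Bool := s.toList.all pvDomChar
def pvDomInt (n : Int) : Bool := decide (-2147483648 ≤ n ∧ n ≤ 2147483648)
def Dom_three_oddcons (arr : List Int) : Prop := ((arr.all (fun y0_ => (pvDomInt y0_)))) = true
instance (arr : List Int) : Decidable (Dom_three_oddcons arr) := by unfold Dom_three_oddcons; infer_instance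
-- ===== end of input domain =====

-- B: idiomatic any() over sliding windows of three (list zipped with its two shifted slices), instead of A's running counter + max.

-- ===== PORT A =====
-- count/maxc loop; i % 2 != 0 via Python's floor mod.
def three_oddcons (arr : List Int) : Bool :=
  let s := arr.foldl
    (fun (s : Int × Int) i =>
      if PySem.Int.mod i 2 ≠ 0 then (s.1 + 1, max s.2 (s.1 + 1)) else ((0 : Int), s.2))
    ((0 : Int), (0 : Int))
  decide (3 ≤ s.2)

-- ===== PORT B =====
-- any(x % 2 and y % 2 and z % 2 for x, y, z in zip(arr, arr[1:], arr[2:]))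
def three_oddcons_alt (arr : List Int) : Bool :=
  ((arr.zip (PySem.List.slice arr (some 1) none)).zip (PySem.List.slice arr (some 2) none)).any
    (fun p => (PySem.Int.mod p.1.1 2 != 0) && (PySem.Int.mod p.1.2 2 != 0) && (PySem.Int.mod p.2 2 != 0))

-- ===== PRECONDITION & SPEC =====
def Spec_three_oddcons (arr : List Int) (out : Bool) : Prop := out = three_oddcons_alt arr
instance (arr : List Int) (out : Bool) : Decidable (Spec_three_oddcons arr out) := by unfold Spec_three_oddcons; infer_instance

-- ===== CLAIM (what is proved, stated in full; the proofs are below) =====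
def Claim_equal_three_oddcons : Prop := ∀ (arr : List Int), Dom_three_oddcons arr → Spec_three_oddcons arr (three_oddcons arr)

-- ===== LEMMAS AND PROOFS =====

def oddB (x : Int) : Bool := PySem.Int.mod x 2 != 0

-- "there are 3 consecutive odds", structurally
def hasRun3 : List Int → Bool
  | a :: b :: c :: rest => (oddB a && oddB b && oddB c) || hasRun3 (b :: c :: rest)
  | _ => false

-- run3 c l : a run of odds of total length ≥ 3 appears, where c odds immediately precede l
def run3 (c : Int) : List Int → Bool
  | [] => false
  | x :: xs => if oddB x then (decide (3 ≤ c + 1) || run3 (c + 1) xs) else run3 0 xs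

def pairOdd : List Int → Bool
  | a :: b :: _ => oddB a && oddB b
  | _ => false

def headOdd : List Int → Bool
  | a :: _ => oddB a
  | _ => false

lemma fold_run3 (l : List Int) (c m : Int) :
    decide (3 ≤ (l.foldl
      (fun (s : Int × Int) i =>
        if PySem.Int.mod i 2 ≠ 0 then (s.1 + 1, max s.2 (s.1 + 1)) else ((0 : Int), s.2))
      (c, m)).2) = (decide (3 ≤ m) || run3 c l) := by
  induction l generalizing c m with
  | nil => simp [run3]
  | cons x xs ih =>
    by_cases hx : oddB x
    · simp only [List.foldl_cons, run3, oddB, bne_iff_ne] at *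
      rw [if_pos (by simpa [oddB, bne_iff_ne] using hx), if_pos (by simpa [oddB, bne_iff_ne] using hx)]
      rw [ih]
      by_cases h1 : (3:Int) ≤ m <;> by_cases h2 : (3:Int) ≤ c + 1 <;>
        simp [h1, h2]
    · simp only [List.foldl_cons, run3]
      rw [if_neg (by simpa [oddB, bne_iff_ne] using hx), if_neg hx]
      exact ih 0 m

lemma run3_chars (l : List Int) :
    run3 0 l = hasRun3 l ∧ run3 1 l = (hasRun3 l || pairOdd l) ∧
      run3 2 l = (hasRun3 l || headOdd l) := by
  induction l with
  | nil => simp [run3, hasRun3, pairOdd, headOdd]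
  | cons x xs ih =>
    obtain ⟨ih0, ih1, ih2⟩ := ih
    rcases xs with _ | ⟨b, _ | ⟨c, r⟩⟩ <;>
      by_cases hx : oddB x <;>
        simp_all [run3, hasRun3, pairOdd, headOdd] <;>
          cases oddB b <;> simp_all <;> cases oddB c <;>
            simp_all [Bool.or_comm]

lemma alt_hasRun3 (l : List Int) :
    ((l.zip (l.drop 1)).zip (l.drop 2)).any
      (fun p => (PySem.Int.mod p.1.1 2 != 0) && (PySem.Int.mod p.1.2 2 != 0) && (PySem.Int.mod p.2 2 != 0))
      = hasRun3 l := by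
  induction l with
  | nil => simp [hasRun3]
  | cons a xs ih =>
    rcases xs with _ | ⟨b, _ | ⟨c, r⟩⟩
    · simp [hasRun3]
    · simp [hasRun3]
    · simpa [hasRun3, oddB] using congrArg (fun t => (oddB a && oddB b && oddB c) || t) ih

lemma slice_drop (l : List Int) :
    PySem.List.slice l (some 1) none = l.drop 1 ∧ PySem.List.slice l (some 2) none = l.drop 2 := by
  constructor
  · rw [show ((1:Int)) = (((1:Nat):Int)) from rfl, PySem.List.slice_from_natCast]
  · rw [show ((2:Int)) = (((2:Nat):Int)) from rfl, PySem.List.slice_from_natCast]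

-- ===== VERDICT (by name: the statement is the Claim_ definition above) =====
theorem three_oddcons_spec : Claim_equal_three_oddcons := by
  intro arr _
  show three_oddcons arr = three_oddcons_alt arr
  unfold three_oddcons three_oddcons_alt
  rw [(slice_drop arr).1, (slice_drop arr).2, alt_hasRun3]
  simpa using (fold_run3 arr 0 0).trans (by simp [(run3_chars arr).1])
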